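-- pv_equiv track=rewrite | github.com/n30j0su3/Model-Agnostic-AI-Personal-Assistant-Framework-PreAlpha | core/skills/core/decision-engine/scripts/route.py | score_agents
-- ===== SOURCE A (Python) =====
-- def score_agents(text, agent_map):
--     scores = {}
--     for agent, keywords in agent_map.items():
--         score = 0
--         for kw in keywords:
--             if kw.lower() in text:
--                 score += 1
--         if score:
--             scores[agent] = score
--     if not scores:
--         return None, 0
--     best_agent = max(scores, key=scores.get)
--     return best_agent, scores[best_agent]
-- ===== SOURCE B (Python) =====
-- def score_agents(text, agent_map):
--     ranked = sorted(((sum(kw.lower() in text for kw in kws), agent)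
--                      for agent, kws in agent_map.items()),
--                     key=lambda t: t[0], reverse=True)
--     if not ranked or ranked[0][0] == 0:
--         return None, 0
--     return ranked[0][1], ranked[0][0]
-- ===== Notes on version B (the rewrite author's own statement) =====
-- stated objective: alternative
-- what changed: B replaces A's scores-dict plus max(key=scores.get) selection by a sort-then-head scheme: it builds the full (score, agent) list, stably sorts it by score descending, and reads the answer off the head, using the 0-score head to produce (None, 0); stability of sorted(reverse=True) reproduces max's first-maximal tie-break.
import Mathlib
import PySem

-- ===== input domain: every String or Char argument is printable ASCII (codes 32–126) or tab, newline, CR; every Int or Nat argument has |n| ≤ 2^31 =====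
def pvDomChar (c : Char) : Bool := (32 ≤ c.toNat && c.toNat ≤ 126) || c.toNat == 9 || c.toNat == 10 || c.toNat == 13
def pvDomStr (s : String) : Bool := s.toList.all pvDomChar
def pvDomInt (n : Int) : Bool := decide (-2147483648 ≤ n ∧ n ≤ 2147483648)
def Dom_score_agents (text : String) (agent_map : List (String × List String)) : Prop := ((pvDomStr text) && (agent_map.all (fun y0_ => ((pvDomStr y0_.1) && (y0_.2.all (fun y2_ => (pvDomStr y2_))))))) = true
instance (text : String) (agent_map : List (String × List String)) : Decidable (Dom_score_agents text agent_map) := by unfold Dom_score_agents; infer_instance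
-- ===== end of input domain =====

-- B replaces A's scores-dict + max(key=scores.get) selection by sort-then-head: build all (score, agent)
-- pairs, stably sort by score descending, read the answer off the head (objective: alternative).
-- agent_map models a Python dict: both ports normalise the association list with PySem.Dict.ofList
-- (insertion order, later duplicate keys overwrite in place), exactly Python's dict construction.

-- ===== PORT A =====
def score_agents (text : String) (agent_map : List (String × List String)) : Option String × Int :=
  let scores : PySem.Dict String Int :=
    (PySem.Dict.ofList agent_map).items.foldl (fun scores p =>
      let score : Int := p.2.foldl (fun score kw =>
        if PySem.Str.isIn (PySem.Str.lower kw) text then score + 1 else score) 0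
      if score ≠ 0 then scores.insert p.1 score else scores) PySem.Dict.empty
  if scores.size = 0 then (none, 0)
  else
    -- max(scores, key=scores.get): every key is present, so scores.get k = scores.getD k 0
    match PySem.List.max? scores.keys (fun k => scores.getD k 0) with
    | some best => (some best, scores.getD best 0)
    | none => (none, 0)

-- ===== PORT B =====
def score_agents_alt (text : String) (agent_map : List (String × List String)) : Option String × Int :=
  -- ranked = sorted(((sum(kw.lower() in text for kw in kws), agent) for agent, kws in agent_map.items()),
  --                key=lambda t: t[0], reverse=True)
  let ranked : List (Int × String) :=
    PySem.List.sorted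
      ((PySem.Dict.ofList agent_map).items.map
        (fun p => (((p.2.countP (fun kw => PySem.Str.isIn (PySem.Str.lower kw) text) : Nat) : Int), p.1)))
      (fun t => t.1) true
  match ranked with
  | [] => (none, 0)
  | (s, a) :: _ => if s = 0 then (none, 0) else (some a, s)

-- ===== PRECONDITION & SPEC =====
def Spec_score_agents (text : String) (agent_map : List (String × List String)) (out : Option String × Int) : Prop := out = score_agents_alt text agent_map
instance (text : String) (agent_map : List (String × List String)) (out : Option String × Int) : Decidable (Spec_score_agents text agent_map out) := by unfold Spec_score_agents; infer_instance

-- ===== CLAIM (what is proved, stated in full; the proofs are below) =====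
def Claim_equal_score_agents : Prop := ∀ (text : String) (agent_map : List (String × List String)), Dom_score_agents text agent_map → Spec_score_agents text agent_map (score_agents text agent_map)

-- ===== LEMMAS AND PROOFS =====

-- the per-agent score of an entry of agent_map
def pvScore (text : String) (p : String × List String) : Int :=
  ((p.2.countP (fun kw => PySem.Str.isIn (PySem.Str.lower kw) text) : Nat) : Int)

-- the (agent, score) pairs with nonzero score, in dict order: both ports reduce to a selection over this list
def pvL (text : String) (agent_map : List (String × List String)) : List (String × Int) :=
  (((PySem.Dict.ofList agent_map).items.filter (fun p => decide (pvScore text p ≠ 0))).map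
    (fun p => (p.1, pvScore text p)))

def pvSel (l : List (String × Int)) : Option String × Int :=
  match PySem.List.max? l (fun q => q.2) with
  | some m => (some m.1, m.2)
  | none => (none, 0)

theorem pv_max?_map {α β κ : Type} [LT κ] [DecidableLT κ] (l : List α) (f : α → β) (key : β → κ) :
    PySem.List.max? (l.map f) key = (PySem.List.max? l (fun x => key (f x))).map f := by
  unfold PySem.List.max?
  rw [List.foldl_map]
  have aux : ∀ (l : List α) (acc : Option α),
      l.foldl (fun acc x => match acc with
        | none => some (f x)
        | some m => if key m < key (f x) then some (f x) else some m) (acc.map f)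
      = (l.foldl (fun acc x => match acc with
        | none => some x
        | some m => if key (f m) < key (f x) then some x else some m) acc).map f := by
    intro l
    induction l with
    | nil => intro acc; rfl
    | cons x t ih =>
      intro acc
      cases acc with
      | none => simpa using ih (some x)
      | some m =>
        simp only [List.foldl_cons, Option.map_some]
        split_ifs with h
        · exact ih (some x)
        · exact ih (some m)
  simpa using aux l none

theorem pv_max?_key_congr {α κ : Type} [LT κ] [DecidableLT κ] (l : List α) (k1 k2 : α → κ)
    (h : ∀ x ∈ l, k1 x = k2 x) : PySem.List.max? l k1 = PySem.List.max? l k2 := by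
  unfold PySem.List.max?
  have aux : ∀ (l : List α) (acc : Option α), (∀ x ∈ l, k1 x = k2 x) →
      (∀ m, acc = some m → k1 m = k2 m) →
      l.foldl (fun acc x => match acc with
        | none => some x
        | some m => if k1 m < k1 x then some x else some m) acc
      = l.foldl (fun acc x => match acc with
        | none => some x
        | some m => if k2 m < k2 x then some x else some m) acc := by
    intro l
    induction l with
    | nil => intro acc _ _; rfl
    | cons x t ih =>
      intro acc hl hacc
      have hx : k1 x = k2 x := hl x (by simp)
      cases acc with
      | none =>
        simp only [List.foldl_cons]
        exact ih (some x) (fun y hy => hl y (by simp [hy])) (by intro m hm; cases hm; exact hx)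
      | some m =>
        have hm : k1 m = k2 m := hacc m rfl
        simp only [List.foldl_cons, hm, hx]
        exact ih _ (fun y hy => hl y (by simp [hy]))
          (by intro m' hm'; split_ifs at hm' <;> simp_all)
  exact aux l none (fun x hx => h x hx) (by intro m h; cases h)

theorem pv_max?_some_acc {α κ : Type} [LT κ] [DecidableLT κ] (t : List α) (a : α) (key : α → κ) :
    t.foldl (fun acc x => match acc with
      | none => some x
      | some m => if key m < key x then some x else some m) (some a)
    = some (t.foldl (fun m x => if key m < key x then x else m) a) := by
  induction t generalizing a with
  | nil => rfl
  | cons x t ih =>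
    simp only [List.foldl_cons]
    split_ifs with h <;> [exact ih x; exact ih a]

theorem pv_max?_cons {α κ : Type} [LT κ] [DecidableLT κ] (q : α) (t : List α) (key : α → κ) :
    PySem.List.max? (q :: t) key = some (t.foldl (fun m x => if key m < key x then x else m) q) := by
  unfold PySem.List.max?
  simp only [List.foldl_cons]
  exact pv_max?_some_acc t q key

-- A reduces to pvSel over pvL
theorem pv_A_eq (text : String) (agent_map : List (String × List String)) :
    score_agents text agent_map = pvSel (pvL text agent_map) := by
  unfold score_agents
  have hsc : (PySem.Dict.ofList agent_map).items.foldl (fun scores p =>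
        let score : Int := p.2.foldl (fun score kw =>
          if PySem.Str.isIn (PySem.Str.lower kw) text then score + 1 else score) 0
        if score ≠ 0 then scores.insert p.1 score else scores) PySem.Dict.empty
      = ((PySem.Dict.ofList agent_map).items.filter
          (fun p => decide (pvScore text p ≠ 0))).foldl
          (fun d p => d.insert p.1 (pvScore text p)) PySem.Dict.empty := by
    rw [PySem.List.foldl_congr_mem _ _
        (fun d p => if pvScore text p ≠ 0 then d.insert p.1 (pvScore text p) else d) _
        (by intro acc p _
            have : p.2.foldl (fun score kw =>
                if PySem.Str.isIn (PySem.Str.lower kw) text then score + 1 else score) (0:Int)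
                = pvScore text p := by
              rw [PySem.List.foldl_if_add_one]; simp [pvScore]
            simp only [this])]
    exact PySem.List.foldl_ite_eq_foldl_filter _ _ _ _
  rw [hsc]
  have hnodup0 : ((PySem.Dict.ofList agent_map).items.map Prod.fst).Nodup := by
    have := PySem.Dict.nodup_keys_ofList agent_map
    simpa [PySem.Dict.keys] using this
  have hnodupfl : (((PySem.Dict.ofList agent_map).items.filter
      (fun p => decide (pvScore text p ≠ 0))).map Prod.fst).Nodup :=
    (List.Sublist.map Prod.fst (List.filter_sublist)).nodup hnodup0
  have hitems : (((PySem.Dict.ofList agent_map).items.filter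
        (fun p => decide (pvScore text p ≠ 0))).foldl
        (fun d p => d.insert p.1 (pvScore text p)) PySem.Dict.empty).items
      = pvL text agent_map := by
    rw [PySem.Dict.items_foldl_insert_fresh _ Prod.fst (fun p => pvScore text p) _
        (fun a _ => PySem.Dict.contains_empty a.1) hnodupfl]
    simp [pvL, PySem.Dict.empty]
  have hkeys : (((PySem.Dict.ofList agent_map).items.filter
        (fun p => decide (pvScore text p ≠ 0))).foldl
        (fun d p => d.insert p.1 (pvScore text p)) PySem.Dict.empty).keys
      = (pvL text agent_map).map Prod.fst := by
    simp only [PySem.Dict.keys, hitems]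
  have hkeysnodup : ((pvL text agent_map).map Prod.fst).Nodup := by
    have : (pvL text agent_map).map Prod.fst
        = ((PySem.Dict.ofList agent_map).items.filter
            (fun p => decide (pvScore text p ≠ 0))).map Prod.fst := by
      simp [pvL, List.map_map]
    rw [this]; exact hnodupfl
  have hgetD : ∀ q ∈ pvL text agent_map,
      (((PySem.Dict.ofList agent_map).items.filter
        (fun p => decide (pvScore text p ≠ 0))).foldl
        (fun d p => d.insert p.1 (pvScore text p)) PySem.Dict.empty).getD q.1 0 = q.2 := by
    intro q hq
    exact PySem.Dict.getD_of_mem_items _ (by rw [hitems]; exact hq) (by rw [PySem.Dict.keys, hitems]; exact hkeysnodup) 0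
  cases hL : pvL text agent_map with
  | nil =>
    have hsize : (((PySem.Dict.ofList agent_map).items.filter
        (fun p => decide (pvScore text p ≠ 0))).foldl
        (fun d p => d.insert p.1 (pvScore text p)) PySem.Dict.empty).size = 0 := by
      simp only [PySem.Dict.size, hitems, hL, List.length_nil]
    rw [if_pos hsize]
    simp [pvSel, PySem.List.max?]
  | cons m0 t =>
    have hsize : ¬ (((PySem.Dict.ofList agent_map).items.filter
        (fun p => decide (pvScore text p ≠ 0))).foldl
        (fun d p => d.insert p.1 (pvScore text p)) PySem.Dict.empty).size = 0 := by
      simp only [PySem.Dict.size, hitems, hL, List.length_cons]; omega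
    rw [if_neg hsize, hkeys, hL]
    rw [pv_max?_map (m0 :: t) Prod.fst _]
    rw [pv_max?_key_congr (m0 :: t) _ (fun q => q.2)
        (by intro q hq; exact hgetD q (by rw [hL]; exact hq))]
    rw [pv_max?_cons]
    simp only [Option.map_some]
    have hFmem : (t.foldl (fun m x => if m.2 < x.2 then x else m) m0) ∈ pvL text agent_map := by
      rw [hL]
      exact PySem.List.max?_mem (pv_max?_cons m0 t (fun q : String × Int => q.2))
    rw [hgetD _ hFmem]
    simp [pvSel, pv_max?_cons]

-- === B side: the head of the stable descending sort is the first key-maximal element (= max?) ===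

-- one insertBy step commutes with head?
theorem pv_head?_insertBy {α κ : Type} [LT κ] [DecidableLT κ] (key : α → κ) (x : α) (ys : List α) :
    (PySem.List.insertBy (fun a b => decide (key b < key a)) x ys).head?
      = match ys.head? with
        | none => some x
        | some m => if key m < key x then some x else some m := by
  cases ys with
  | nil => rfl
  | cons y t =>
    simp only [PySem.List.insertBy]
    split_ifs with h <;> simp_all

theorem pv_head?_foldl_insertBy {α κ : Type} [LT κ] [DecidableLT κ] (key : α → κ)
    (l : List α) (acc : List α) :
    (l.foldl (fun acc x => PySem.List.insertBy (fun a b => decide (key b < key a)) x acc) acc).head?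
      = l.foldl (fun o x => match o with
          | none => some x
          | some m => if key m < key x then some x else some m) acc.head? := by
  induction l generalizing acc with
  | nil => rfl
  | cons x t ih =>
    simp only [List.foldl_cons]
    rw [ih, pv_head?_insertBy]

theorem pv_head?_sorted_rev {α κ : Type} [LT κ] [DecidableLT κ] (l : List α) (key : α → κ) :
    (PySem.List.sorted l key true).head? = PySem.List.max? l key := by
  rw [PySem.List.sorted_rev_eq_foldl_insertBy, pv_head?_foldl_insertBy]
  rfl

-- interpretation of a running maximum as score_agents' result
def pvInterp (o : Option (Int × String)) : Option String × Int :=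
  match o with
  | none => (none, 0)
  | some q => if q.1 = 0 then (none, 0) else (some q.2, q.1)

def pvStep (acc : Option (Int × String)) (x : Int × String) : Option (Int × String) :=
  match acc with
  | none => some x
  | some m => if m.1 < x.1 then some x else some m

-- with a positive running maximum, zero-score entries never matter
theorem pv_fold_pos_filter (t : List (Int × String)) (m : Int × String)
    (hm : 0 < m.1) (ht : ∀ q ∈ t, 0 ≤ q.1) :
    t.foldl pvStep (some m) = (t.filter (fun q => decide (q.1 ≠ 0))).foldl pvStep (some m) := by
  induction t generalizing m with
  | nil => rfl
  | cons r t ih =>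
    by_cases h0 : r.1 = 0
    · have hstep : pvStep (some m) r = some m := by
        simp only [pvStep]; rw [if_neg]; omega
      rw [List.foldl_cons, hstep, List.filter_cons_of_neg (by simp [h0])]
      exact ih m hm (fun q hq => ht q (by simp [hq]))
    · rw [List.foldl_cons, List.filter_cons_of_pos (by simp [h0]), List.foldl_cons]
      have hr : 0 < r.1 := by
        have := ht r (by simp); omega
      simp only [pvStep]
      split_ifs with h
      · exact ih r hr (fun q hq => ht q (by simp [hq]))
      · exact ih m hm (fun q hq => ht q (by simp [hq]))

-- a zero-score accumulator is as good as no accumulator, up to the interpretation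
theorem pv_fold_zero_none (t : List (Int × String)) (ht : ∀ q ∈ t, 0 ≤ q.1)
    (m : Int × String) (hm : m.1 = 0) :
    pvInterp (t.foldl pvStep (some m)) = pvInterp (t.foldl pvStep none) := by
  induction t generalizing m with
  | nil => simp [pvInterp, hm]
  | cons r t ih =>
    by_cases h0 : r.1 = 0
    · have hstep : pvStep (some m) r = some m := by
        simp only [pvStep]; rw [if_neg]; omega
      have hstep' : pvStep none r = some r := rfl
      rw [List.foldl_cons, hstep, List.foldl_cons, hstep',
        ih (fun q hq => ht q (by simp [hq])) m hm,
        ih (fun q hq => ht q (by simp [hq])) r h0]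
    · have hr : 0 < r.1 := by
        have := ht r (by simp); omega
      have hstep : pvStep (some m) r = some r := by
        simp only [pvStep]; rw [if_pos]; omega
      rw [List.foldl_cons, hstep, List.foldl_cons]
      rfl

-- filtering the zero-score entries out does not change the interpreted maximum
theorem pv_interp_filter (l : List (Int × String)) (hl : ∀ q ∈ l, 0 ≤ q.1) :
    pvInterp (PySem.List.max? l (fun q => q.1))
      = pvInterp (PySem.List.max? (l.filter (fun q => decide (q.1 ≠ 0))) (fun q => q.1)) := by
  have hmx : ∀ (l' : List (Int × String)), PySem.List.max? l' (fun q => q.1) = l'.foldl pvStep none := by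
    intro l'
    unfold PySem.List.max?
    congr 1
    funext acc x
    cases acc <;> rfl
  rw [hmx, hmx]
  induction l with
  | nil => rfl
  | cons q t ih =>
    by_cases h0 : q.1 = 0
    · rw [List.foldl_cons, List.filter_cons_of_neg (by simp [h0])]
      have hstep : pvStep none q = some q := rfl
      rw [hstep, pv_fold_zero_none t (fun r hr => hl r (by simp [hr])) q h0]
      exact ih (fun r hr => hl r (by simp [hr]))
    · have hq : 0 < q.1 := by
        have := hl q (by simp); omega
      rw [List.foldl_cons, List.filter_cons_of_pos (by simp [h0]), List.foldl_cons]
      exact congrArg pvInterp (pv_fold_pos_filter t q hq (fun r hr => hl r (by simp [hr])))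

-- B reduces to pvSel over pvL
theorem pv_B_eq (text : String) (agent_map : List (String × List String)) :
    score_agents_alt text agent_map = pvSel (pvL text agent_map) := by
  unfold score_agents_alt
  have hmapfun : (fun p : String × List String =>
        (((p.2.countP (fun kw => PySem.Str.isIn (PySem.Str.lower kw) text) : Nat) : Int), p.1))
      = fun p => (pvScore text p, p.1) := rfl
  rw [hmapfun]
  set M : List (Int × String) :=
    (PySem.Dict.ofList agent_map).items.map (fun p => (pvScore text p, p.1)) with hM
  have hMpos : ∀ q ∈ M, 0 ≤ q.1 := by
    intro q hq
    obtain ⟨p, _, rfl⟩ := List.mem_map.mp hq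
    exact Int.natCast_nonneg _
  -- pvL is the zero-filtered M with the components swapped
  have hpvL : pvL text agent_map
      = (M.filter (fun q => decide (q.1 ≠ 0))).map (fun q => (q.2, q.1)) := by
    rw [hM, List.filter_map, List.map_map]
    rfl
  -- pvSel over pvL in terms of the filtered M
  have hsel : pvSel (pvL text agent_map)
      = pvInterp (PySem.List.max? (M.filter (fun q => decide (q.1 ≠ 0))) (fun q => q.1)) := by
    rw [hpvL]
    unfold pvSel
    rw [pv_max?_map (M.filter (fun q => decide (q.1 ≠ 0))) (fun q => (q.2, q.1))
      (fun q : String × Int => q.2)]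
    cases hf : PySem.List.max? (M.filter (fun q => decide (q.1 ≠ 0))) (fun q => q.1) with
    | none => rfl
    | some m =>
      have hmne : m.1 ≠ 0 := by
        have := (List.mem_filter.mp (PySem.List.max?_mem hf)).2
        simpa using this
      simp [pvInterp, hmne]
  rw [hsel, ← pv_interp_filter M hMpos]
  -- and B itself is the interpreted head of the descending sort = interpreted max?
  cases hS : PySem.List.sorted M (fun t : Int × String => t.1) true with
  | nil =>
    have hMnil : M = [] := (PySem.List.sorted_eq_nil_iff M _ true).mp hS
    simp [hMnil, pvInterp, PySem.List.max?]
  | cons q t =>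
    have hhead : PySem.List.max? M (fun q : Int × String => q.1) = some q := by
      rw [← pv_head?_sorted_rev, hS]; rfl
    rw [hhead]
    cases q with
    | mk s a => rfl

-- ===== VERDICT (by name: the statement is the Claim_ definition above) =====
theorem score_agents_spec : Claim_equal_score_agents := by
  intro text agent_map _
  unfold Spec_score_agents
  rw [pv_A_eq, pv_B_eq]
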